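-- pv_equiv track=rewrite | github.com/bloodxsr/Xena | bot/utils/autodelete.py | parse_command_name_from_message
-- ===== SOURCE A (Python) =====
-- from collections.abc import Iterable
--
-- def parse_command_name_from_message(
--     message_content: str,
--     prefixes: str | Iterable[str],
-- ) -> str | None:
--     content = message_content.strip()
--     if not content:
--         return None
--
--     if isinstance(prefixes, str):
--         prefix_list = [prefixes]
--     else:
--         prefix_list = [prefix for prefix in prefixes]
--
--     for prefix in sorted(prefix_list, key=len, reverse=True):
--         if not prefix:
--             continue
--         if content.startswith(prefix):
--             without_prefix = content[len(prefix) :].strip()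
--             if not without_prefix:
--                 return None
--             return without_prefix.split()[0].lower()
--     return None
-- ===== SOURCE B (Python) =====
-- def parse_command_name_from_message(message_content, prefixes):
--     content = message_content.strip()
--     if not content:
--         return None
--
--     if isinstance(prefixes, str):
--         prefix_list = [prefixes]
--     else:
--         prefix_list = [prefix for prefix in prefixes]
--
--     best = None
--     for prefix in prefix_list:
--         if prefix and content.startswith(prefix) and (best is None or len(prefix) > len(best)):
--             best = prefix
--
--     if best is None:
--         return None
--     without_prefix = content[len(best):].strip()
--     if not without_prefix:
--         return None
--     return without_prefix.split()[0].lower()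
-- ===== Notes on version B (the rewrite author's own statement) =====
-- stated objective: simpler
-- what changed: Replaces the sort-by-length-descending-then-first-match loop with a single unsorted pass that keeps the strictly longest matching prefix (strict > preserves the stable sort's first-equal-length tie-break), then handles the suffix once after the loop.
import Mathlib
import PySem

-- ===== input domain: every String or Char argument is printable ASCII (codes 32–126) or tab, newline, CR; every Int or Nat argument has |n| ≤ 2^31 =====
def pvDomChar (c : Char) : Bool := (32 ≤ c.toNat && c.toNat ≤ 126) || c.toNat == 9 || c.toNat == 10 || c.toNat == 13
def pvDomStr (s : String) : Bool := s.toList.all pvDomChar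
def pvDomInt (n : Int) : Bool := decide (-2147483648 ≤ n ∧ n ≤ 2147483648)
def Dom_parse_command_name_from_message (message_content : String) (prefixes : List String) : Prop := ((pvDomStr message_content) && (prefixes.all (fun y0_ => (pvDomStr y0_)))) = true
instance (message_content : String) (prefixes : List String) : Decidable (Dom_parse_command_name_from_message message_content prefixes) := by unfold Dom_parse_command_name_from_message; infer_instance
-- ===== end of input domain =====

-- B removes the sort: a single unsorted pass keeps the strictly longest matching prefix
-- (strict > reproduces the stable descending sort's first-equal-length tie-break); objective: simpler.

-- ===== PORT A =====
-- shared tail of both Pythons: content[len(prefix):].strip(); None if empty, else first word lowered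
def pvTail (content p : String) : Option String :=
  let without_prefix := PySem.Str.strip (PySem.Str.slice content (some (PySem.Str.len p)) none)
  if without_prefix = "" then none
  else
    match PySem.Str.split₀ without_prefix with
    | [] => none          -- unreachable: without_prefix is non-empty and stripped
    | w :: _ => some (PySem.Str.lower w)

-- A's for-loop over the sorted prefix list
def pvLoopA (content : String) : List String → Option String
  | [] => none
  | p :: rest =>
    if p = "" then pvLoopA content rest
    else if PySem.Str.startswith content p then pvTail content p
    else pvLoopA content rest

def parse_command_name_from_message (message_content : String) (prefixes : List String) : Option String :=
  let content := PySem.Str.strip message_content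
  if content = "" then none
  else pvLoopA content (PySem.List.sorted prefixes PySem.Str.len true)

-- ===== PORT B =====
-- best is None or len(prefix) > len(best)
def pvBetter (p : String) : Option String → Bool
  | none => true
  | some b => decide (PySem.Str.len b < PySem.Str.len p)

-- the loop body of B: keep the strictly longer matching prefix
def pvPick (content : String) (best : Option String) (p : String) : Option String :=
  if (!(p == "")) && PySem.Str.startswith content p && pvBetter p best then some p else best

def parse_command_name_from_message_alt (message_content : String) (prefixes : List String) : Option String :=
  let content := PySem.Str.strip message_content
  if content = "" then none
  else
    match prefixes.foldl (pvPick content) none with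
    | none => none
    | some best => pvTail content best

-- ===== PRECONDITION & SPEC =====
def Spec_parse_command_name_from_message (message_content : String) (prefixes : List String) (out : Option String) : Prop := out = parse_command_name_from_message_alt message_content prefixes
instance (message_content : String) (prefixes : List String) (out : Option String) : Decidable (Spec_parse_command_name_from_message message_content prefixes out) := by unfold Spec_parse_command_name_from_message; infer_instance

-- ===== CLAIM (what is proved, stated in full; the proofs are below) =====
def Claim_equal_parse_command_name_from_message : Prop := ∀ (message_content : String) (prefixes : List String), Dom_parse_command_name_from_message message_content prefixes → Spec_parse_command_name_from_message message_content prefixes (parse_command_name_from_message message_content prefixes)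

-- ===== LEMMAS AND PROOFS =====

-- the loop's acceptance test: non-empty and a prefix of content
def pvOk (content p : String) : Bool := (!(p == "")) && PySem.Str.startswith content p

-- pvPick's condition factored through pvOk (definitional)
lemma pvPick_eq (c p : String) (b : Option String) :
    pvPick c b p = if pvOk c p && pvBetter p b then some p else b := rfl

-- A's loop is find?-then-tail
lemma pvLoopA_eq_find (c : String) (s : List String) :
    pvLoopA c s = (List.find? (pvOk c) s).bind (pvTail c) := by
  induction s with
  | nil => rfl
  | cons p rest ih =>
    cases hpb : (p == "") with
    | true =>
      have hp : p = "" := by simpa using hpb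
      simp [pvLoopA, hp, List.find?, pvOk, ih]
    | false =>
      have hp : ¬ p = "" := by simpa using hpb
      cases hsb : PySem.Str.startswith c p with
      | true =>
        rw [PySem.Str.startswith_eq] at hsb
        simp [pvLoopA, hp, hpb, hsb, List.find?, pvOk]
      | false =>
        rw [PySem.Str.startswith_eq] at hsb
        simp [pvLoopA, hp, hpb, hsb, List.find?, pvOk, ih]

-- inserting one element into a descending-by-length list moves find? one pvPick step
lemma pvFind_insertBy (c p : String) (s : List String)
    (hs : s.Pairwise (fun a b => PySem.Str.len b ≤ PySem.Str.len a)) :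
    List.find? (pvOk c) (PySem.List.insertBy (fun a b => decide (PySem.Str.len b < PySem.Str.len a)) p s)
      = pvPick c (List.find? (pvOk c) s) p := by
  induction s with
  | nil =>
    simp only [PySem.List.insertBy]
    cases hp : pvOk c p with
    | true => rw [List.find?_cons_of_pos hp]; simp [pvPick_eq, hp, pvBetter]
    | false =>
      rw [List.find?_cons_of_neg (by simp [hp])]
      simp [List.find?, pvPick_eq, hp]
  | cons y t ih =>
    rw [List.pairwise_cons] at hs
    obtain ⟨hy, ht⟩ := hs
    by_cases hlen : y.length < p.length
    · -- p is inserted in front of y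
      simp only [PySem.List.insertBy]
      rw [if_pos (by simpa using hlen)]
      cases hp : pvOk c p with
      | true =>
        rw [List.find?_cons_of_pos hp]
        cases hf : List.find? (pvOk c) (y :: t) with
        | none => simp [pvPick_eq, hp, pvBetter]
        | some x =>
          have hxy : x.length ≤ y.length := by
            rcases List.mem_cons.mp (List.mem_of_find?_eq_some hf) with h | h
            · simp [h]
            · simpa using hy x h
          simp [pvPick_eq, hp, pvBetter, lt_of_le_of_lt hxy hlen]
      | false =>
        rw [List.find?_cons_of_neg (by simp [hp])]
        simp [pvPick_eq, hp]
    · -- p is inserted after y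
      simp only [PySem.List.insertBy]
      rw [if_neg (by simpa using hlen)]
      cases hyok : pvOk c y with
      | true =>
        rw [List.find?_cons_of_pos hyok, List.find?_cons_of_pos hyok]
        simp [pvPick_eq, pvBetter, hlen]
      | false =>
        rw [List.find?_cons_of_neg (by simp [hyok]), List.find?_cons_of_neg (by simp [hyok])]
        exact ih ht

-- main bridge: B's fold over the raw list equals find? over A's sorted list
lemma pvFold_eq_find_sorted (c : String) (ps : List String) :
    ps.foldl (pvPick c) none
      = List.find? (pvOk c) (PySem.List.sorted ps PySem.Str.len true) := by
  induction ps using List.reverseRecOn with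
  | nil => rfl
  | append_singleton ps p ih =>
    rw [PySem.List.sorted_rev_eq_foldl_insertBy, List.foldl_append, List.foldl_append,
        ← PySem.List.sorted_rev_eq_foldl_insertBy]
    simp only [List.foldl_cons, List.foldl_nil]
    rw [pvFind_insertBy c p _ (PySem.List.sorted_pairwise_rev ps PySem.Str.len), ← ih]

-- ===== VERDICT (by name: the statement is the Claim_ definition above) =====
theorem parse_command_name_from_message_spec : Claim_equal_parse_command_name_from_message := by
  intro mc ps _
  unfold Spec_parse_command_name_from_message parse_command_name_from_message
    parse_command_name_from_message_alt
  by_cases h : PySem.Str.strip mc = ""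
  · simp only [h, if_pos]
  · rw [if_neg h, if_neg h, pvLoopA_eq_find, ← pvFold_eq_find_sorted]
    generalize ps.foldl (pvPick (PySem.Str.strip mc)) none = r
    cases r
    · exact rfl
    · simp
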